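-- pv_equiv track=rewrite | github.com/pypi-data/pypi-mirror-399 | packages/tauro/tauro-0.1.4-py3-none-any.whl/core/feature_store/materialized/store.py | _lists_to_records
-- ===== SOURCE A (Python) =====
-- from typing import Any, Dict, List, Optional, Union
--
-- def _lists_to_records(data: Dict[str, List[Any]]) -> List[Dict[str, Any]]:
--     """Convert lists format to records format."""
--     if not data:
--         return []
--
--     # Get length from first feature list
--     length = len(next(iter(data.values())))
--     records = [{} for _ in range(length)]
--
--     for feature_name, values in data.items():
--         if len(values) != length:
--             raise ValueError(f"Feature '{feature_name}' has mismatched length")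
--         for i, value in enumerate(values):
--             records[i][feature_name] = value
--
--     return records
-- ===== SOURCE B (Python) =====
-- def _lists_to_records(data):
--     """Convert lists format to records format (row-major rebuild)."""
--     if not data:
--         return []
--     length = len(next(iter(data.values())))
--     for feature_name, values in data.items():
--         if len(values) != length:
--             raise ValueError(f"Feature '{feature_name}' has mismatched length")
--     return [{name: values[i] for name, values in data.items()} for i in range(length)]
-- ===== Notes on version B (the rewrite author's own statement) =====
-- stated objective: simpler
-- what changed: Replaces A's preallocate-then-column-major-scatter (mutating each record dict per feature) with a separate ordered validation pass followed by a row-major comprehension building each complete record at once.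
import Mathlib
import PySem

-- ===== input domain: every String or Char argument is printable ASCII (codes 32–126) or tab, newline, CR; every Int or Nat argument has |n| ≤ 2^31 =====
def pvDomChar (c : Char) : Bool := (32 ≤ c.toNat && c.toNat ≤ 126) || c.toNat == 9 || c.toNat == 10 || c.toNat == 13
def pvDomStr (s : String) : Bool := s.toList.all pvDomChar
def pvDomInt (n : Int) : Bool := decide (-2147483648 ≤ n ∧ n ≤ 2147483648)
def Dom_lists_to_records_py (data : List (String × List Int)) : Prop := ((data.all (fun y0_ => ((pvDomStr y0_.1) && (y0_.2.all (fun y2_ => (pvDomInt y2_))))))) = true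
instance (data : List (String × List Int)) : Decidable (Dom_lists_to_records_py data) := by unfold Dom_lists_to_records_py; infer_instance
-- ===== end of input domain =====

-- B replaces A's preallocate-then-column-major scatter with an ordered validation pass
-- followed by a row-major build of each complete record (objective: simpler).


-- ===== PORT A =====
-- inner loop 'for i, value in enumerate(values): records[i][feature_name] = value':
-- walks values and records in parallel (exact, since the guard ensures len(values) == len(records));
-- each assignment is a Python dict assignment on the record.
def pvScatterA (name : String) : List Int → List (List (String × Int)) → List (List (String × Int))
  | [], recs => recs
  | _ :: _, [] => []
  | v :: vs, r :: rs => ((PySem.Dict.mk r).insert name v).items :: pvScatterA name vs rs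

-- outer loop 'for feature_name, values in data.items(): …'; none = the ValueError (excluded by Pre_)
def pvLoopA : List (String × List Int) → Nat → List (List (String × Int)) → Option (List (List (String × Int)))
  | [], _, recs => some recs
  | (name, values) :: rest, length, recs =>
    if values.length = length then pvLoopA rest length (pvScatterA name values recs)
    else none

def lists_to_records_py (data : List (String × List Int)) : List (List (String × Int)) :=
  match data with
  | [] => []
  | (_, vs) :: _ =>
    let length := vs.length
    let records : List (List (String × Int)) := List.replicate length []
    (pvLoopA data length records).getD []

-- ===== PORT B =====
def lists_to_records_py_alt (data : List (String × List Int)) : List (List (String × Int)) :=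
  match data with
  | [] => []
  | (_, vs) :: _ =>
    let length := vs.length
    if data.all (fun p => p.2.length == length) then
      -- row-major comprehension; values[i] is exact since i < length = len(values)
      (List.range length).map (fun i => data.map (fun p => (p.1, p.2.getD i 0)))
    else []  -- the ValueError path, excluded by Pre_

-- ===== PRECONDITION & SPEC =====
-- Pre_ excludes (a) inputs where A raises ValueError (a feature list whose length differs from the
-- first one) and (b) association lists with duplicate keys, which cannot arise from a Python dict.
def Pre_lists_to_records_py (data : List (String × List Int)) : Prop :=
  (data.map Prod.fst).Nodup ∧ ∀ p ∈ data, p.2.length = (data.headD ("", [])).2.length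
instance (data : List (String × List Int)) : Decidable (Pre_lists_to_records_py data) := by
  unfold Pre_lists_to_records_py; infer_instance

def pvWitness_lists_to_records_py : (List (String × List Int)) :=
  [("a", [1, 2]), ("b", [3, 4])]

def Spec_lists_to_records_py (data : List (String × List Int)) (out : List (List (String × Int))) : Prop := out = lists_to_records_py_alt data
instance (data : List (String × List Int)) (out : List (List (String × Int))) : Decidable (Spec_lists_to_records_py data out) := by unfold Spec_lists_to_records_py; infer_instance

-- ===== CLAIM (what is proved, stated in full; the proofs are below) =====
def Claim_equal_lists_to_records_py : Prop := ∀ (data : List (String × List Int)), Dom_lists_to_records_py data → Pre_lists_to_records_py data → Spec_lists_to_records_py data (lists_to_records_py data)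

-- ===== LEMMAS AND PROOFS =====

-- one dict assignment with a fresh key appends the pair
theorem pv_insert_fresh (r : List (String × Int)) (name : String) (v : Int)
    (h : name ∉ r.map Prod.fst) :
    ((PySem.Dict.mk r).insert name v).items = r ++ [(name, v)] := by
  have hc : (PySem.Dict.mk r).contains name = false := by
    rw [PySem.Dict.contains_eq_decide_mem_keys]
    simpa [PySem.Dict.keys] using h
  simp [PySem.Dict.items_insert, hc]

-- scattering one feature over the rows of the processed prefix appends its column entry to each row
theorem pv_scatter_rows (name : String) (done : List (String × List Int)) (vals : List Int)
    (n : Nat) (hlen : vals.length = n) (hfresh : name ∉ done.map Prod.fst) :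
    pvScatterA name vals ((List.range n).map (fun i => done.map (fun p => (p.1, p.2.getD i 0))))
      = (List.range n).map (fun i =>
          (done ++ [(name, vals)]).map (fun p => (p.1, p.2.getD i 0))) := by
  -- reduce to a general zipWith shape, then go pointwise
  have hz : ∀ (vs : List Int) (recs : List (List (String × Int))), vs.length = recs.length →
      pvScatterA name vs recs
        = List.zipWith (fun r v => ((PySem.Dict.mk r).insert name v).items) recs vs := by
    intro vs
    induction vs with
    | nil => intro recs h; cases recs <;> simp_all [pvScatterA]
    | cons v vs ih =>
      intro recs h
      cases recs with
      | nil => simp at h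
      | cons r rs => simp only [pvScatterA, List.zipWith]; rw [ih rs (by simp at h; omega)]
  rw [hz _ _ (by simp [hlen])]
  apply List.ext_getElem
  · simp [hlen]
  · intro i h1 h2
    have hi : i < n := by simpa using h2
    have hiv : i < vals.length := by omega
    simp only [List.getElem_zipWith, List.getElem_map, List.getElem_range]
    rw [pv_insert_fresh]
    · simp [List.getD, List.getElem?_eq_getElem hiv]
    · simpa [List.map_map, Function.comp] using hfresh

-- the outer loop, relative to an already-processed prefix 'done'
theorem pv_loopA_rows (ds done : List (String × List Int)) (n : Nat)
    (hlen : ∀ p ∈ ds, p.2.length = n)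
    (hnd : ((done ++ ds).map Prod.fst).Nodup) :
    pvLoopA ds n ((List.range n).map (fun i => done.map (fun p => (p.1, p.2.getD i 0))))
      = some ((List.range n).map (fun i => (done ++ ds).map (fun p => (p.1, p.2.getD i 0)))) := by
  induction ds generalizing done with
  | nil => simp [pvLoopA]
  | cons hd tl ih =>
    obtain ⟨name, vals⟩ := hd
    have hv : vals.length = n := hlen (name, vals) (by simp)
    have hfresh : name ∉ done.map Prod.fst := by
      intro hmem
      have hdisj : (done.map Prod.fst).Disjoint (name :: tl.map Prod.fst) :=
        List.disjoint_of_nodup_append (by simpa using hnd)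
      exact hdisj hmem (by simp)
    simp only [pvLoopA, hv, if_true]
    rw [pv_scatter_rows name done vals n hv hfresh]
    have := ih (done ++ [(name, vals)])
      (fun p hp => hlen p (by simp [hp]))
      (by simpa using hnd)
    simpa using this

theorem lists_to_records_py_spec : Claim_equal_lists_to_records_py := by
  intro data _hdom hpre
  obtain ⟨hnd, hlen⟩ := hpre
  unfold Spec_lists_to_records_py
  match data with
  | [] => rfl
  | (name0, vs) :: rest =>
    simp only [lists_to_records_py, lists_to_records_py_alt]
    have hall : ((name0, vs) :: rest).all (fun p => p.2.length == vs.length) = true := by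
      simp only [List.all_eq_true]
      intro p hp
      simpa using hlen p hp
    rw [if_pos hall]
    have hrepl : (List.replicate vs.length ([] : List (String × Int)))
        = (List.range vs.length).map
            (fun i => ([] : List (String × List Int)).map (fun p => (p.1, p.2.getD i 0))) := by
      simp [List.map_const']
    rw [hrepl, pv_loopA_rows ((name0, vs) :: rest) [] vs.length
        (fun p hp => by simpa using hlen p hp) (by simpa using hnd)]
    rfl
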